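-- pv_equiv track=rewrite | github.com/ar492/Competitive-Programming | Liftoff2021/battleship.py | get_squares_occupied
-- ===== SOURCE A (Python) =====
-- def get_squares_occupied(arrangement, ship_len):
-- 	"""
-- 	Finds the locations (r, c) of the squares occupied by a ship of length ship_len and arrangement.
-- 	:param arrangement: A tuple of integers representing the ship's arrangement.
-- 	:param ship_len: An integer representing the ship's length
-- 	:return: A list of tuples representing the squares occupied by the ship.
-- 	"""
--
-- 	r, c, d = arrangement
--
-- 	if d == 0:
-- 		# Ship faces north
-- 		rr = r + ship_len
-- 		cc = c + 1
-- 	elif d == 1: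
-- 		# Ship faces east
-- 		rr = r + 1
-- 		cc = c + 1
-- 		c = cc - ship_len
-- 	elif d == 2:
-- 		# Ship faces south
-- 		rr = r + 1
-- 		r = rr - ship_len
-- 		cc = c + 1
-- 	else:
-- 		# Ship faces west
-- 		rr = r + 1
-- 		cc = c + ship_len
--
-- 	squares = []
-- 	for row in range(r, rr):
-- 		for col in range(c, cc):
-- 			squares.append([row, col])
--
-- 	return squares
-- ===== SOURCE B (Python) =====
-- def get_squares_occupied(arrangement, ship_len):
--     r, c, d = arrangement
--     dr, dc = (1, 0) if d in (0, 2) else (0, 1)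
--     if d in (1, 2):
--         # the anchor is the far end of the ship: step back to the start
--         r, c = r - (ship_len - 1) * dr, c - (ship_len - 1) * dc
--     cells = []
--     n = ship_len
--     while n > 0:
--         cells.append([r, c])
--         r, c, n = r + dr, c + dc, n - 1
--     return cells
-- ===== Notes on version B (the rewrite author's own statement) =====
-- stated objective: alternative
-- what changed: Replaces A's branch-computed bounding box with nested row/column loops by an axis/orientation classification (vertical vs horizontal, anchor-at-far-end vs anchor-at-start) and a recursive walk that steps the position cell by cell.
import Mathlib
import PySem

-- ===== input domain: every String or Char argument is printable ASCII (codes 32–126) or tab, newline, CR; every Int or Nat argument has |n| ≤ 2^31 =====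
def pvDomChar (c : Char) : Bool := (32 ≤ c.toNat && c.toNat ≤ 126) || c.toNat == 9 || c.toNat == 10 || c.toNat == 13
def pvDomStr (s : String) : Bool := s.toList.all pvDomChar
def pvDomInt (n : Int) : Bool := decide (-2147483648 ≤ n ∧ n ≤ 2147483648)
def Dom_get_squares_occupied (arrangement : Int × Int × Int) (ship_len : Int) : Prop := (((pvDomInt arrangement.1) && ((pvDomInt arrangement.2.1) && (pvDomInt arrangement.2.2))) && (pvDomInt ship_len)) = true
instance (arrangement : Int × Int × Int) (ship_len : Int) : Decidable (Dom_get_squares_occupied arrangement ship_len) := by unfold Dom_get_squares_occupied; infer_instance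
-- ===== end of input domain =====

-- B replaces A's branch-computed bounding box + nested row/column loops by an
-- axis/orientation classification and a recursive walk stepping the position
-- cell by cell (objective: alternative, same cost).

-- ===== PORT A =====
def get_squares_occupied (arrangement : Int × Int × Int) (ship_len : Int) : List (List Int) :=
  let r := arrangement.1
  let c := arrangement.2.1
  let d := arrangement.2.2
  -- the if/elif chain computing (r, c, rr, cc); r and c are reassigned in branches 1 and 2
  let rccc : Int × Int × Int × Int :=
    if d == 0 then (r, c, r + ship_len, c + 1)
    else if d == 1 then (r, (c + 1) - ship_len, r + 1, c + 1)
    else if d == 2 then ((r + 1) - ship_len, c, r + 1, c + 1)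
    else (r, c, r + 1, c + ship_len)
  let r' := rccc.1
  let c' := rccc.2.1
  let rr := rccc.2.2.1
  let cc := rccc.2.2.2
  (PySem.List.pyRange r' rr 1).foldl
    (fun squares row =>
      (PySem.List.pyRange c' cc 1).foldl (fun squares col => squares ++ [[row, col]]) squares)
    []

-- ===== PORT B =====
-- the inner recursive helper `walk`: step (r, c) by (dr, dc), counting n down to 0
def pvWalk (dr dc : Int) (r c n : Int) : List (List Int) :=
  if n ≤ 0 then []
  else [r, c] :: pvWalk dr dc (r + dr) (c + dc) (n - 1)
termination_by n.toNat
decreasing_by omega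

def get_squares_occupied_alt (arrangement : Int × Int × Int) (ship_len : Int) : List (List Int) :=
  let r := arrangement.1
  let c := arrangement.2.1
  let d := arrangement.2.2
  let step : Int × Int := if d == 0 || d == 2 then (1, 0) else (0, 1)
  let dr := step.1
  let dc := step.2
  let start : Int × Int :=
    if d == 1 || d == 2 then (r - (ship_len - 1) * dr, c - (ship_len - 1) * dc)
    else (r, c)
  pvWalk dr dc start.1 start.2 ship_len

-- ===== PRECONDITION & SPEC =====
def Spec_get_squares_occupied (arrangement : Int × Int × Int) (ship_len : Int) (out : List (List Int)) : Prop := out = get_squares_occupied_alt arrangement ship_len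
instance (arrangement : Int × Int × Int) (ship_len : Int) (out : List (List Int)) : Decidable (Spec_get_squares_occupied arrangement ship_len out) := by unfold Spec_get_squares_occupied; infer_instance

-- ===== CLAIM =====
def Claim_equal_get_squares_occupied : Prop := ∀ (arrangement : Int × Int × Int) (ship_len : Int), Dom_get_squares_occupied arrangement ship_len → Spec_get_squares_occupied arrangement ship_len (get_squares_occupied arrangement ship_len)

-- ===== LEMMAS AND PROOFS =====

-- shift a unit-step range: map f over range(a, a+s) = map g over range(0, s) when f (a+k) = g k
theorem map_pyRange_shift (a b s : Int) (hb : b = a + s) (f g : Int → List Int)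
    (h : ∀ k : Int, f (a + k) = g k) :
    (PySem.List.pyRange a b 1).map f = (PySem.List.pyRange 0 s 1).map g := by
  subst hb
  rw [PySem.List.pyRange_one, PySem.List.pyRange_one]
  have hn : (a + s - a).toNat = (s - 0).toNat := by omega
  rw [hn, List.map_map, List.map_map]
  refine List.map_congr_left ?_
  intro k _
  simpa using h k

-- the recursive walk in closed form: a map over range(0, n)
theorem pvWalk_closed (dr dc : Int) : ∀ (m : Nat) (n : Int), n.toNat = m → ∀ r c,
    pvWalk dr dc r c n = (PySem.List.pyRange 0 n 1).map (fun i => [r + i * dr, c + i * dc]) := by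
  intro m
  induction m with
  | zero =>
    intro n hn r c
    rw [pvWalk, if_pos (by omega : n ≤ 0), PySem.List.pyRange_one_eq_nil (by omega : n ≤ 0)]
    rfl
  | succ m ih =>
    intro n hn r c
    rw [pvWalk, if_neg (by omega : ¬ n ≤ 0), ih (n - 1) (by omega) (r + dr) (c + dc)]
    rw [PySem.List.pyRange_one_cons (by omega : (0:Int) < n), List.map_cons]
    refine congrArg₂ _ (by norm_num) ?_
    simp only [zero_add]
    rw [map_pyRange_shift 1 n (n - 1) (by ring) _ _ (fun k => ?_)]
    simp only [List.cons.injEq, and_true]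
    exact ⟨by ring, by ring⟩

-- ===== VERDICT =====
theorem get_squares_occupied_spec : Claim_equal_get_squares_occupied := by
  intro ⟨r, c, d⟩ s _
  unfold Spec_get_squares_occupied get_squares_occupied get_squares_occupied_alt
  simp only
  by_cases h0 : d = 0
  · subst h0
    simp only [Int.reduceBEq, Bool.or_false, Bool.false_or, Bool.true_or, Bool.or_true,
      Bool.or_self, Bool.false_eq_true, if_false, reduceIte, beq_self_eq_true]
    simp only [PySem.List.pyRange_one_singleton, List.foldl_cons, List.foldl_nil,
      PySem.List.foldl_append_singleton_eq_map, List.nil_append]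
    rw [pvWalk_closed 1 0 s.toNat s rfl r c]
    exact map_pyRange_shift r (r + s) s rfl _ _
      (fun k => by simp only [List.cons.injEq, and_true]; exact ⟨by ring, by ring⟩)
  · by_cases h1 : d = 1
    · subst h1
      simp only [Int.reduceBEq, Bool.or_false, Bool.false_or, Bool.true_or, Bool.or_true,
        Bool.or_self, Bool.false_eq_true, if_false, reduceIte, beq_self_eq_true]
      simp only [PySem.List.pyRange_one_singleton, List.foldl_cons, List.foldl_nil,
        PySem.List.foldl_append_singleton_eq_map, List.nil_append]
      rw [pvWalk_closed 0 1 s.toNat s rfl (r - (s - 1) * 0) (c - (s - 1) * 1)]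
      exact map_pyRange_shift (c + 1 - s) (c + 1) s (by ring) _ _
        (fun k => by simp only [List.cons.injEq, and_true]; exact ⟨by ring, by ring⟩)
    · by_cases h2 : d = 2
      · subst h2
        simp only [Int.reduceBEq, Bool.or_false, Bool.false_or, Bool.true_or, Bool.or_true,
          Bool.or_self, Bool.false_eq_true, if_false, reduceIte, beq_self_eq_true]
        simp only [PySem.List.pyRange_one_singleton, List.foldl_cons, List.foldl_nil,
          PySem.List.foldl_append_singleton_eq_map, List.nil_append]
        rw [pvWalk_closed 1 0 s.toNat s rfl (r - (s - 1) * 1) (c - (s - 1) * 0)]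
        exact map_pyRange_shift (r + 1 - s) (r + 1) s (by ring) _ _
          (fun k => by simp only [List.cons.injEq, and_true]; exact ⟨by ring, by ring⟩)
      · have hc0 : (d == 0) = false := by simp [h0]
        have hc1 : (d == 1) = false := by simp [h1]
        have hc2 : (d == 2) = false := by simp [h2]
        simp only [hc0, hc1, hc2, Bool.or_false, Bool.false_or, Bool.false_eq_true, if_false, reduceIte]
        simp only [PySem.List.pyRange_one_singleton, List.foldl_cons, List.foldl_nil,
          PySem.List.foldl_append_singleton_eq_map, List.nil_append]
        rw [pvWalk_closed 0 1 s.toNat s rfl r c]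
        exact map_pyRange_shift c (c + s) s rfl _ _
          (fun k => by simp only [List.cons.injEq, and_true]; exact ⟨by ring, by ring⟩)
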